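-- pv_equiv track=rewrite | github.com/horsehour/cocite | citcredit.py | get_strengths
-- ===== SOURCE A (Python) =====
-- def get_strengths(cocited, references):
--     strengths = []
--     for cc in cocited:
--         s = 0
--         for ref in references:
--             if cc in ref:
--                 s += 1
--         strengths.append(s)
--     return strengths
-- ===== SOURCE B (Python) =====
-- def get_strengths(cocited, references):
--     counts = {}
--     for ref in references:
--         for x in set(ref):
--             counts[x] = counts.get(x, 0) + 1
--     return [counts.get(cc, 0) for cc in cocited]
-- ===== Notes on version B (the rewrite author's own statement) =====
-- stated objective: faster
-- what changed: Builds a dict mapping each element to the number of references containing it (iterating each reference's unique elements once), then answers each cocited query by a single dict lookup, replacing A's scan of every reference for every cocited item.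
import Mathlib
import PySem

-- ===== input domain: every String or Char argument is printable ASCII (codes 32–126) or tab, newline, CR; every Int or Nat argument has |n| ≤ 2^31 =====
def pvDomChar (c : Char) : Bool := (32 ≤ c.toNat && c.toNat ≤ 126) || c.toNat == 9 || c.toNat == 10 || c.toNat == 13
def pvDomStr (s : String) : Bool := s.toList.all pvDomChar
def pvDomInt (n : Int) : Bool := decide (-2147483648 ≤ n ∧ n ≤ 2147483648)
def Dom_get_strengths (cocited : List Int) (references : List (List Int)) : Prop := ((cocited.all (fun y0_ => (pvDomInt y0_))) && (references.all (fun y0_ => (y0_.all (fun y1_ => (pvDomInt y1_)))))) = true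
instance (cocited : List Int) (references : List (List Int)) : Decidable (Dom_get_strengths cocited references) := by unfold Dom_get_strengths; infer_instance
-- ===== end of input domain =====

-- B replaces A's per-item scan of all references by a dict (element -> number of
-- references containing it) built once from each reference's unique elements; faster.

-- ===== PORT A =====
def get_strengths (cocited : List Int) (references : List (List Int)) : List Int :=
  cocited.foldl
    (fun strengths cc =>
      strengths ++ [references.foldl (fun s ref => if ref.contains cc then s + 1 else s) (0 : Int)])
    []

-- ===== PORT B =====
def get_strengths_alt (cocited : List Int) (references : List (List Int)) : List Int :=
  let counts : PySem.Dict Int Int :=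
    references.foldl
      (fun d ref => (PySem.Set.ofList ref).foldl (fun d x => d.insert x (d.getD x 0 + 1)) d)
      PySem.Dict.empty
  cocited.map (fun cc => counts.getD cc 0)

-- ===== PRECONDITION & SPEC =====
def Spec_get_strengths (cocited : List Int) (references : List (List Int)) (out : List Int) : Prop := out = get_strengths_alt cocited references
instance (cocited : List Int) (references : List (List Int)) (out : List Int) : Decidable (Spec_get_strengths cocited references out) := by unfold Spec_get_strengths; infer_instance

-- ===== CLAIM (what is proved, stated in full; the proofs are below) =====
def Claim_equal_get_strengths : Prop := ∀ (cocited : List Int) (references : List (List Int)), Dom_get_strengths cocited references → Spec_get_strengths cocited references (get_strengths cocited references)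

-- ===== LEMMAS AND PROOFS =====

-- On a duplicate-free list, count is 1 or 0 by membership.
theorem count_of_nodup {α : Type} [DecidableEq α] (l : List α) (h : l.Nodup) (x : α) :
    l.count x = if x ∈ l then 1 else 0 := by
  split_ifs with hm
  · exact List.count_eq_one_of_mem h hm
  · exact List.count_eq_zero.2 hm

-- The dict built by B counts, for each key, the references containing it.
theorem getD_counts (references : List (List Int)) (d : PySem.Dict Int Int) (cc : Int) :
    (references.foldl
      (fun d ref => (PySem.Set.ofList ref).foldl (fun d x => d.insert x (d.getD x 0 + 1)) d)
      d).getD cc 0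
    = d.getD cc 0 + (references.countP (fun ref => ref.contains cc) : Int) := by
  induction references generalizing d with
  | nil => simp
  | cons ref rest ih =>
    simp only [List.foldl_cons, ih, PySem.Dict.getD_foldl_insert_add_one, List.countP_cons]
    have hn : (PySem.Set.ofList ref).Nodup := PySem.Set.nodup_ofList ref
    have hc : (PySem.Set.ofList ref).count cc = if ref.contains cc then 1 else 0 := by
      rw [count_of_nodup _ hn]
      simp [PySem.Set.mem_ofList]
    rw [hc]
    split_ifs <;> push_cast <;> ring

theorem get_strengths_spec' (cocited : List Int) (references : List (List Int)) :
    get_strengths cocited references = get_strengths_alt cocited references := by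
  unfold get_strengths get_strengths_alt
  rw [PySem.List.foldl_append_singleton_eq_map]
  refine List.map_congr_left (fun cc _ => ?_)
  rw [PySem.List.foldl_count_if, getD_counts]
  simp

-- ===== VERDICT (by name: the statement is the Claim_ definition above) =====
theorem get_strengths_spec : Claim_equal_get_strengths := by
  intro cocited references _
  exact get_strengths_spec' cocited references
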